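-- pv_equiv track=rewrite | github.com/CoolPeachJuice/Monitoring_STLnested2.0 | Monitoring_STLnested_tree/STLnested_tree.py | check_conjuction
-- ===== SOURCE A (Python) =====
-- def check_conjuction(c_list):
--     for i in range(len(c_list)):
--         if c_list[i] == False:
--             return False
--     for i in range(len(c_list)):  # 到这里说明没有False，则不是True就是None
--         if c_list[i] == None:
--             return None
--     return True
-- ===== SOURCE B (Python) =====
-- def check_conjuction(c_list):
--     saw_none = False
--     for x in c_list:
--         if x == False:
--             return False
--         elif x == None:
--             saw_none = True
--     return None if saw_none else True
-- ===== Notes on version B (the rewrite author's own statement) =====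
-- stated objective: simpler
-- what changed: Replaces A's two sequential full scans (one for False, then one for None) with a single stateful pass that tracks a saw_none flag and returns False early.
import Mathlib
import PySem

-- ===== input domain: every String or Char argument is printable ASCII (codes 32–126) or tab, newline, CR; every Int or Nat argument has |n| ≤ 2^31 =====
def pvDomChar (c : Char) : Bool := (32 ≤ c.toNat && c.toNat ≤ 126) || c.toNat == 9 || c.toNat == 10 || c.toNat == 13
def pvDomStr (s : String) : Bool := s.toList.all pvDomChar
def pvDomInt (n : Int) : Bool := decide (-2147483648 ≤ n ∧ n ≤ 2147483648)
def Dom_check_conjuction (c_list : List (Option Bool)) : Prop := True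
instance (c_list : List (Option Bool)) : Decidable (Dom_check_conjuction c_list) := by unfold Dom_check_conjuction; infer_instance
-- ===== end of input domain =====

-- B replaces A's two sequential full scans with one stateful pass tracking a saw_none flag (simpler single-loop decomposition; return value identical).

-- ===== PORT A =====
-- first loop of A: returns some r when the loop returns early (r = false), none when it runs off
def pvScanFalse : List (Option Bool) → Option (Option Bool)
  | [] => none
  | x :: xs => if x == some false then some (some false) else pvScanFalse xs

-- second loop of A: returns some r when it returns early (r = none), none when it runs off
def pvScanNone : List (Option Bool) → Option (Option Bool)
  | [] => none
  | x :: xs => if x == none then some none else pvScanNone xs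

def check_conjuction (c_list : List (Option Bool)) : Option Bool :=
  match pvScanFalse c_list with
  | some r => r
  | none =>
    match pvScanNone c_list with
    | some r => r
    | none => some true

-- ===== PORT B =====
-- single pass with the saw_none accumulator
def pvOnePass : List (Option Bool) → Bool → Option Bool
  | [], sawNone => if sawNone then none else some true
  | x :: xs, sawNone =>
    if x == some false then some false
    else if x == none then pvOnePass xs true
    else pvOnePass xs sawNone

def check_conjuction_alt (c_list : List (Option Bool)) : Option Bool :=
  pvOnePass c_list false

-- ===== PRECONDITION & SPEC =====
def Spec_check_conjuction (c_list : List (Option Bool)) (out : Option Bool) : Prop := out = check_conjuction_alt c_list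
instance (c_list : List (Option Bool)) (out : Option Bool) : Decidable (Spec_check_conjuction c_list out) := by unfold Spec_check_conjuction; infer_instance

-- ===== CLAIM (what is proved, stated in full; the proofs are below) =====
def Claim_equal_check_conjuction : Prop := ∀ (c_list : List (Option Bool)), Dom_check_conjuction c_list → Spec_check_conjuction c_list (check_conjuction c_list)

-- ===== LEMMAS AND PROOFS =====

theorem pvScanFalse_char (l : List (Option Bool)) :
    pvScanFalse l = if some false ∈ l then some (some false) else none := by
  induction l with
  | nil => simp [pvScanFalse]
  | cons x xs ih =>
    by_cases h : x = some false
    · simp [pvScanFalse, h]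
    · simp [pvScanFalse, h, Ne.symm h, ih]

theorem pvScanNone_char (l : List (Option Bool)) :
    pvScanNone l = if none ∈ l then some none else none := by
  induction l with
  | nil => simp [pvScanNone]
  | cons x xs ih =>
    by_cases h : x = none
    · simp [pvScanNone, h]
    · simp [pvScanNone, h, Ne.symm h, ih]

theorem pvOnePass_char (l : List (Option Bool)) (saw : Bool) :
    pvOnePass l saw =
      if some false ∈ l then some false
      else if saw ∨ none ∈ l then none else some true := by
  induction l generalizing saw with
  | nil => cases saw <;> simp [pvOnePass]
  | cons x xs ih =>
    by_cases hf : x = some false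
    · simp [pvOnePass, hf]
    · by_cases hn : x = none
      · simp [pvOnePass, hn, ih]
      · simp [pvOnePass, hf, Ne.symm hf, hn, Ne.symm hn, ih]

-- ===== VERDICT (by name: the statement is the Claim_ definition above) =====
theorem check_conjuction_spec : Claim_equal_check_conjuction := by
  intro l _
  unfold Spec_check_conjuction check_conjuction check_conjuction_alt
  rw [pvScanFalse_char, pvScanNone_char, pvOnePass_char]
  by_cases hf : some false ∈ l <;> by_cases hn : (none : Option Bool) ∈ l <;> simp [hf, hn]
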